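-- pv_equiv track=rewrite | github.com/exo7math/python1-en-exo7 | lsystems/lsystems.py | iterate_lsysteme_2
-- ===== SOURCE A (Python) =====
-- def replace_2(word,letter1,pattern1,letter2,pattern2):
--     new_word = ""
--     for c in word:
--         if c == letter1:
--             new_word = new_word + pattern1
--         elif c == letter2:
--             new_word = new_word + pattern2
--         else:
--             new_word = new_word + c
--
--     return new_word
--
-- def iterate_lsysteme_2(start,rule1,rule2,k):
--     word = start
--     letter1 = rule1[0]
--     pattern1 = rule1[1]
--     letter2 = rule2[0]
--     pattern2 = rule2[1]
--
--     for i in range(k):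
--         word = replace_2(word,letter1,pattern1,letter2,pattern2)
--     return word
-- ===== SOURCE B (Python) =====
-- def iterate_lsysteme_2(start, rule1, rule2, k):
--     letter1 = rule1[0]
--     pattern1 = rule1[1]
--     letter2 = rule2[0]
--     pattern2 = rule2[1]
--
--     def step(c):
--         if c == letter1:
--             return pattern1
--         if c == letter2:
--             return pattern2
--         return c
--
--     # distinct characters that can ever appear (closed under step), first occurrences
--     alphabet = list(dict.fromkeys(start + pattern1 + pattern2))
--     # table[c] = expansion of the single character c after j levels
--     table = {c: c for c in alphabet}
--     for _ in range(k):
--         table = {c: ''.join(table[d] for d in step(c)) for c in alphabet}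
--     return ''.join(table[c] for c in start)
-- ===== Notes on version B (the rewrite author's own statement) =====
-- stated objective: faster
-- what changed: Instead of k whole-string rewriting passes, B computes a per-character expansion table by dynamic programming over the (closed) finite alphabet of distinct characters -- one expansion per distinct character per level -- and finally maps start through the table; the per-occurrence rewriting work disappears.
import Mathlib
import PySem

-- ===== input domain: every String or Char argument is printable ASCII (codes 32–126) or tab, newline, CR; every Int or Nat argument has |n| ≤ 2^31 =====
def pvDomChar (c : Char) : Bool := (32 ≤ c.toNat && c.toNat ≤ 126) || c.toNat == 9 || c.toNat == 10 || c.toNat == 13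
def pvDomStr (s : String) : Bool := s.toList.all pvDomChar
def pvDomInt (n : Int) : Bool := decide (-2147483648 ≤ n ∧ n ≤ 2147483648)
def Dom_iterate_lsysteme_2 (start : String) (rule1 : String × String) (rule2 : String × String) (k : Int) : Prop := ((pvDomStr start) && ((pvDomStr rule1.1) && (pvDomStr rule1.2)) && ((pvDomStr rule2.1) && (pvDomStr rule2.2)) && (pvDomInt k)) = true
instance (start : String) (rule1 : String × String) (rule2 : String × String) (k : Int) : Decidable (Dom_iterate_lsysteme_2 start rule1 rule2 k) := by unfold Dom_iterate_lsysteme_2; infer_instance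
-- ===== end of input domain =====

-- B replaces A's k whole-string passes by a per-character expansion table over the distinct
-- characters (a dict updated k times), then maps start through the table; measurably faster.

-- ===== PORT A =====
-- replace_2: one pass over word, appending pattern1 / pattern2 / the character itself
-- (Python compares the single character c with the string letter1/letter2: equal iff that
-- string is exactly [c]); strings handled as List Char with a String.mk wrapper.
def replace_2 (word : String) (letter1 : String) (pattern1 : String) (letter2 : String) (pattern2 : String) : String :=
  String.ofList (word.toList.foldl (fun new_word c =>
    if [c] = letter1.toList then new_word ++ pattern1.toList
    else if [c] = letter2.toList then new_word ++ pattern2.toList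
    else new_word ++ [c]) [])

def iterate_lsysteme_2 (start : String) (rule1 : String × String) (rule2 : String × String) (k : Int) : String :=
  let letter1 := rule1.1
  let pattern1 := rule1.2
  let letter2 := rule2.1
  let pattern2 := rule2.2
  (PySem.List.pyRange 0 k 1).foldl (fun word _ => replace_2 word letter1 pattern1 letter2 pattern2) start

-- ===== PORT B =====
-- one-step replacement of a single character (letter1 wins, as in A's if/elif)
def lsysStep (letter1 : String) (pattern1 : String) (letter2 : String) (pattern2 : String) (c : Char) : List Char :=
  if [c] = letter1.toList then pattern1.toList
  else if [c] = letter2.toList then pattern2.toList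
  else [c]

def iterate_lsysteme_2_alt (start : String) (rule1 : String × String) (rule2 : String × String) (k : Int) : String :=
  let letter1 := rule1.1
  let pattern1 := rule1.2
  let letter2 := rule2.1
  let pattern2 := rule2.2
  -- alphabet = list(dict.fromkeys(start + pattern1 + pattern2)), closed under lsysStep
  let alphabet : List Char := PySem.List.dedup (start.toList ++ pattern1.toList ++ pattern2.toList)
  -- table = {c: c for c in alphabet}
  let table0 : PySem.Dict Char (List Char) :=
    alphabet.foldl (fun t c => t.insert c [c]) PySem.Dict.empty
  -- k times: table = {c: ''.join(table[d] for d in step(c)) for c in alphabet}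
  -- (table[d] always hits a key since the alphabet is closed; getD's default is unreachable)
  let table : PySem.Dict Char (List Char) :=
    (PySem.List.pyRange 0 k 1).foldl (fun t _ =>
      alphabet.foldl (fun t' c =>
        t'.insert c ((lsysStep letter1 pattern1 letter2 pattern2 c).flatMap (fun d => t.getD d [])))
        PySem.Dict.empty) table0
  -- ''.join(table[c] for c in start)
  String.ofList (start.toList.flatMap (fun c => table.getD c []))

-- ===== PRECONDITION & SPEC =====
def Spec_iterate_lsysteme_2 (start : String) (rule1 : String × String) (rule2 : String × String) (k : Int) (out : String) : Prop := out = iterate_lsysteme_2_alt start rule1 rule2 k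
instance (start : String) (rule1 : String × String) (rule2 : String × String) (k : Int) (out : String) : Decidable (Spec_iterate_lsysteme_2 start rule1 rule2 k out) := by unfold Spec_iterate_lsysteme_2; infer_instance

-- ===== CLAIM (what is proved, stated in full; the proofs are below) =====
def Claim_equal_iterate_lsysteme_2 : Prop := ∀ (start : String) (rule1 : String × String) (rule2 : String × String) (k : Int), Dom_iterate_lsysteme_2 start rule1 rule2 k → Spec_iterate_lsysteme_2 start rule1 rule2 k (iterate_lsysteme_2 start rule1 rule2 k)

-- ===== LEMMAS AND PROOFS =====

-- the one-step rewrite on character lists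
def lsysR (l1 p1 l2 p2 : String) (w : List Char) : List Char :=
  w.flatMap (lsysStep l1 p1 l2 p2)

-- A's replace_2 computes one lsysR step
theorem replace_2_toList (w l1 p1 l2 p2 : String) :
    (replace_2 w l1 p1 l2 p2).toList = lsysR l1 p1 l2 p2 w.toList := by
  have h : (w.toList.foldl (fun new_word c =>
      if [c] = l1.toList then new_word ++ p1.toList
      else if [c] = l2.toList then new_word ++ p2.toList
      else new_word ++ [c]) ([] : List Char))
      = w.toList.foldl (fun acc c => acc ++ lsysStep l1 p1 l2 p2 c) [] := by
    apply PySem.List.foldl_congr_mem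
    intro acc c _
    simp only [lsysStep]
    split_ifs <;> rfl
  simp only [replace_2, String.toList_ofList, h, PySem.List.foldl_append_eq_flatMap, lsysR,
    List.nil_append]

-- a foldl that ignores the list elements is Function.iterate (length) times
theorem foldl_ignore {α β : Type} (g : α → α) :
    ∀ (l : List β) (x : α), l.foldl (fun a _ => g a) x = g^[l.length] x := by
  intro l
  induction l with
  | nil => intro x; rfl
  | cons b l ih =>
      intro x
      simp [List.foldl_cons, ih, Function.iterate_succ_apply]

-- iterated rewrite is determined by its values on single characters
theorem lsysR_iterate_flatMap (l1 p1 l2 p2 : String) :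
    ∀ (n : ℕ) (w : List Char),
      (lsysR l1 p1 l2 p2)^[n] w = w.flatMap (fun c => (lsysR l1 p1 l2 p2)^[n] [c]) := by
  intro n
  induction n with
  | zero => intro w; simp
  | succ n ih =>
      intro w
      calc (lsysR l1 p1 l2 p2)^[n+1] w
          = (lsysR l1 p1 l2 p2)^[n] (lsysR l1 p1 l2 p2 w) := Function.iterate_succ_apply _ _ _
        _ = (lsysR l1 p1 l2 p2 w).flatMap (fun c => (lsysR l1 p1 l2 p2)^[n] [c]) := ih _
        _ = w.flatMap (fun c => (lsysR l1 p1 l2 p2)^[n] (lsysStep l1 p1 l2 p2 c)) := by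
              simp only [lsysR, List.flatMap_assoc]
              exact List.flatMap_congr (fun c _ => (ih _).symm)
        _ = w.flatMap (fun c => (lsysR l1 p1 l2 p2)^[n+1] [c]) := by
              apply List.flatMap_congr
              intro c _
              rw [Function.iterate_succ_apply]
              congr 1
              simp [lsysR]

-- fold of fresh inserts over a list: a key not in the list is untouched
theorem getD_foldl_insert_not_mem (A : List Char) (f : Char → List Char) (c : Char)
    (h : c ∉ A) :
    ∀ t : PySem.Dict Char (List Char),
      (A.foldl (fun t c' => t.insert c' (f c')) t).getD c [] = t.getD c [] := by
  induction A with
  | nil => intro t; rfl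
  | cons a A ih =>
      intro t
      have hca : c ≠ a := fun hc => h (hc ▸ List.mem_cons_self ..)
      have hcA : c ∉ A := fun hc => h (List.mem_cons_of_mem _ hc)
      simp only [List.foldl_cons, ih hcA, PySem.Dict.getD_insert_of_ne _ _ _ hca]

-- fold of inserts over a list: a key in the list gets its value
theorem getD_foldl_insert_mem (A : List Char) (f : Char → List Char) (c : Char)
    (h : c ∈ A) :
    ∀ t : PySem.Dict Char (List Char),
      (A.foldl (fun t c' => t.insert c' (f c')) t).getD c [] = f c := by
  induction A with
  | nil => exact absurd h (List.not_mem_nil)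
  | cons a A ih =>
      intro t
      by_cases hcA : c ∈ A
      · simp only [List.foldl_cons, ih hcA]
      · have hca : c = a := by
          rcases List.mem_cons.mp h with h1 | h1
          · exact h1
          · exact absurd h1 hcA
        subst hca
        simp only [List.foldl_cons, getD_foldl_insert_not_mem A f c hcA,
          PySem.Dict.getD_insert_self]

-- the alphabet is closed under the one-step rewrite
theorem lsysStep_closed (l1 p1 l2 p2 : String) (S : List Char)
    (hp1 : ∀ d ∈ p1.toList, d ∈ S) (hp2 : ∀ d ∈ p2.toList, d ∈ S)
    (c : Char) (hc : c ∈ S) :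
    ∀ d ∈ lsysStep l1 p1 l2 p2 c, d ∈ S := by
  intro d hd
  simp only [lsysStep] at hd
  split_ifs at hd
  · exact hp1 d hd
  · exact hp2 d hd
  · simp at hd; exact hd ▸ hc

-- table invariant: after n outer passes, the table maps every alphabet character c
-- to the n-fold expansion of [c]
theorem lsys_table_inv (l1 p1 l2 p2 : String) (S : List Char)
    (hp1 : ∀ d ∈ p1.toList, d ∈ S) (hp2 : ∀ d ∈ p2.toList, d ∈ S) :
    ∀ (n : ℕ) (c : Char), c ∈ S →
      ((fun t : PySem.Dict Char (List Char) =>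
          (PySem.List.dedup S).foldl (fun t' c =>
            t'.insert c ((lsysStep l1 p1 l2 p2 c).flatMap (fun d => t.getD d [])))
            PySem.Dict.empty)^[n]
        ((PySem.List.dedup S).foldl (fun t c => t.insert c [c]) PySem.Dict.empty)).getD c []
      = (lsysR l1 p1 l2 p2)^[n] [c] := by
  intro n
  induction n with
  | zero =>
      intro c hc
      have hc' : c ∈ PySem.List.dedup S := (PySem.List.mem_dedup ..).mpr hc
      rw [Function.iterate_zero_apply, Function.iterate_zero_apply]
      exact getD_foldl_insert_mem _ (fun c => [c]) c hc' _
  | succ n ih =>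
      intro c hc
      have hc' : c ∈ PySem.List.dedup S := (PySem.List.mem_dedup ..).mpr hc
      rw [Function.iterate_succ_apply']
      rw [getD_foldl_insert_mem _ _ c hc' _]
      have hmem : ∀ d ∈ lsysStep l1 p1 l2 p2 c,
          ((fun t : PySem.Dict Char (List Char) =>
              (PySem.List.dedup S).foldl (fun t' c =>
                t'.insert c ((lsysStep l1 p1 l2 p2 c).flatMap (fun d => t.getD d [])))
                PySem.Dict.empty)^[n]
            ((PySem.List.dedup S).foldl (fun t c => t.insert c [c]) PySem.Dict.empty)).getD d []
          = (lsysR l1 p1 l2 p2)^[n] [d] := by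
        intro d hd
        exact ih d (lsysStep_closed l1 p1 l2 p2 S hp1 hp2 c hc d hd)
      rw [List.flatMap_congr hmem]
      have h1 : (lsysR l1 p1 l2 p2)^[n+1] [c]
          = (lsysR l1 p1 l2 p2)^[n] (lsysStep l1 p1 l2 p2 c) := by
        rw [Function.iterate_succ_apply]
        congr 1
        simp [lsysR]
      rw [h1, lsysR_iterate_flatMap]

-- ===== VERDICT (by name: the statement is the Claim_ definition above) =====
theorem iterate_lsysteme_2_spec : Claim_equal_iterate_lsysteme_2 := by
  intro start rule1 rule2 k _
  unfold Spec_iterate_lsysteme_2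
  obtain ⟨l1, p1⟩ := rule1
  obtain ⟨l2, p2⟩ := rule2
  set S : List Char := start.toList ++ p1.toList ++ p2.toList with hS
  have hp1 : ∀ d ∈ p1.toList, d ∈ S := by intro d hd; simp [hS, hd]
  have hp2 : ∀ d ∈ p2.toList, d ∈ S := by intro d hd; simp [hS, hd]
  have hstart : ∀ c ∈ start.toList, c ∈ S := by intro c hc; simp [hS, hc]
  -- A's side: n-fold application of lsysR on the character list
  have hA : (iterate_lsysteme_2 start (l1, p1) (l2, p2) k).toList
      = (lsysR l1 p1 l2 p2)^[(PySem.List.pyRange 0 k 1).length] start.toList := by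
    simp only [iterate_lsysteme_2]
    rw [foldl_ignore (fun w => replace_2 w l1 p1 l2 p2) (PySem.List.pyRange 0 k 1) start]
    generalize (PySem.List.pyRange 0 k 1).length = n
    induction n with
    | zero => rfl
    | succ n ihn =>
        rw [Function.iterate_succ_apply', Function.iterate_succ_apply',
          replace_2_toList, ihn]
  -- B's side
  have hB : (iterate_lsysteme_2_alt start (l1, p1) (l2, p2) k).toList
      = start.toList.flatMap
          (fun c => (lsysR l1 p1 l2 p2)^[(PySem.List.pyRange 0 k 1).length] [c]) := by
    simp only [iterate_lsysteme_2_alt]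
    rw [foldl_ignore _ (PySem.List.pyRange 0 k 1)]
    rw [String.toList_ofList]
    apply List.flatMap_congr
    intro c hc
    exact lsys_table_inv l1 p1 l2 p2 S hp1 hp2 _ c (hstart c hc)
  have : (iterate_lsysteme_2 start (l1, p1) (l2, p2) k).toList
      = (iterate_lsysteme_2_alt start (l1, p1) (l2, p2) k).toList := by
    rw [hA, hB, lsysR_iterate_flatMap]
  exact String.toList_inj.mp this
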